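-- pv_equiv track=rewrite | github.com/Narcolapser/Minecraft-Command-Craft | command_joiner.py | form_command
-- ===== SOURCE A (Python) =====
-- def form_command(commands,depth):
-- 	if len(commands) == 0:
-- 		return final_pass.replace("VAL_NUM",str(depth))
-- 	command = commands.pop()
-- 	passenger = form_command(commands,depth + 1)
-- 	ret = inner.replace("VAL_COMMAND",command)
-- 	ret = ret.replace("VAL_PASSENGER",passenger)
-- 	return ret
--
-- inner = "{id:falling_block,Block:command_block,Time:1,TileEntityData:{VAL_COMMAND},Passengers:[VAL_PASSENGER]}"
--
-- final_pass = """{id:falling_block,Block:command_block,Time:1,TileEntityData:{Command:/fill ~ ~-VAL_NUM ~-1 ~ ~ ~-1 redstone_block},Passengers:[{id:falling_block,Block:redstone_block,Time:1}]}"""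
-- ===== SOURCE B (Python) =====
-- inner = "{id:falling_block,Block:command_block,Time:1,TileEntityData:{VAL_COMMAND},Passengers:[VAL_PASSENGER]}"
--
-- final_pass = """{id:falling_block,Block:command_block,Time:1,TileEntityData:{Command:/fill ~ ~-VAL_NUM ~-1 ~ ~ ~-1 redstone_block},Passengers:[{id:falling_block,Block:redstone_block,Time:1}]}"""
--
-- def form_command(commands, depth):
--     # Iterative, inside-out: the base block sits at depth + len(commands);
--     # each command, front to back, wraps the result one level further out.
--     result = final_pass.replace("VAL_NUM", str(depth + len(commands)))
--     while commands:
--         cmd = commands.pop(0)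
--         result = inner.replace("VAL_COMMAND", cmd).replace("VAL_PASSENGER", result)
--     return result
-- ===== Notes on version B (the rewrite author's own statement) =====
-- stated objective: simpler
-- what changed: Replaces the recursion with an iterative inside-out loop: the base string is built once with depth+len(commands), then each command (front to back) wraps the accumulated result; no recursive calls.
import Mathlib
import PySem

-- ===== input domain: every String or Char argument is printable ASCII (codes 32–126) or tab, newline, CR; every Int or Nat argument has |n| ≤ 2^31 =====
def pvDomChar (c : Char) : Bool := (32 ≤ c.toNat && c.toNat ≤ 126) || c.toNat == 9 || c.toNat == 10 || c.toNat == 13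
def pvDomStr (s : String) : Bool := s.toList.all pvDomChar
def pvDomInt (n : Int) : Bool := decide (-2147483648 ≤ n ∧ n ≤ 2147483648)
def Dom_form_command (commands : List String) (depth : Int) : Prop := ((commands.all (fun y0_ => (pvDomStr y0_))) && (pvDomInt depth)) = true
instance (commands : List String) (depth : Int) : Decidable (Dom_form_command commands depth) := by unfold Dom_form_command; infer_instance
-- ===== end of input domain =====

-- B replaces A's recursion by an iterative inside-out loop; equivalence is about the
-- RETURN value only (both Pythons empty the `commands` list in place).

def pvInner : String := "{id:falling_block,Block:command_block,Time:1,TileEntityData:{VAL_COMMAND},Passengers:[VAL_PASSENGER]}"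

def pvFinalPass : String := "{id:falling_block,Block:command_block,Time:1,TileEntityData:{Command:/fill ~ ~-VAL_NUM ~-1 ~ ~ ~-1 redstone_block},Passengers:[{id:falling_block,Block:redstone_block,Time:1}]}"

-- ===== PORT A =====
-- commands.pop() pops the LAST element; recursion on the remaining prefix.
def form_command (commands : List String) (depth : Int) : String :=
  if h : commands.length = 0 then
    PySem.Str.replace pvFinalPass "VAL_NUM" (PySem.Int.toStr depth)
  else
    let command := commands.getLast (by intro hn; simp [hn] at h)
    let passenger := form_command commands.dropLast (depth + 1)
    let ret := PySem.Str.replace pvInner "VAL_COMMAND" command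
    PySem.Str.replace ret "VAL_PASSENGER" passenger
termination_by commands.length
decreasing_by
  cases commands with
  | nil => simp at h
  | cons a t => simp [List.length_dropLast]

-- ===== PORT B =====
def form_command_alt (commands : List String) (depth : Int) : String :=
  let init := PySem.Str.replace pvFinalPass "VAL_NUM" (PySem.Int.toStr (depth + commands.length))
  commands.foldl (fun result cmd =>
    PySem.Str.replace (PySem.Str.replace pvInner "VAL_COMMAND" cmd) "VAL_PASSENGER" result) init

-- ===== PRECONDITION & SPEC =====
def Spec_form_command (commands : List String) (depth : Int) (out : String) : Prop := out = form_command_alt commands depth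
instance (commands : List String) (depth : Int) (out : String) : Decidable (Spec_form_command commands depth out) := by unfold Spec_form_command; infer_instance

-- ===== CLAIM (what is proved, stated in full; the proofs are below) =====
def Claim_equal_form_command : Prop := ∀ (commands : List String) (depth : Int), Dom_form_command commands depth → Spec_form_command commands depth (form_command commands depth)

-- ===== LEMMAS AND PROOFS =====

theorem form_command_eq_alt : ∀ (commands : List String) (depth : Int),
    form_command commands depth = form_command_alt commands depth := by
  intro commands
  induction commands using List.reverseRecOn with
  | nil =>
    intro d
    rw [form_command]
    simp [form_command_alt]
  | append_singleton ys x ih =>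
    intro d
    rw [form_command]
    rw [dif_neg (by simp)]
    simp only [List.getLast_append, List.dropLast_concat]
    rw [ih (d + 1)]
    simp only [form_command_alt, List.foldl_append, List.foldl_cons, List.foldl_nil]
    rw [show d + 1 + ((ys.length : Int)) = d + ((ys ++ [x]).length : Int) by
      simp; ring]
    simp

-- ===== VERDICT (by name: the statement is the Claim_ definition above) =====
theorem form_command_spec : Claim_equal_form_command := by
  intro commands depth _
  exact form_command_eq_alt commands depth
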